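-- pv_equiv track=rewrite | github.com/davidmcarreira/parallel-computing | Ex9/ex1.py | subtract_dicts
-- ===== SOURCE A (Python) =====
-- def subtract_dicts(dict1, dict2):
--     # Initialize an empty result dictionary
--     result = {}
--     # Iterate over the keys in dict1
--     for key in dict1.keys():
--         # If the key is also in dict2, subtract the values
--         if key in dict2:
--             result[key] = {}
--             for subkey in dict1[key].keys():
--                 result[key][subkey] = dict1[key][subkey] - dict2[key][subkey]
--         # If the key is not in dict2, add it to the result dictionary with the value from dict1
--         else:
--             result[key] = dict1[key]
--     # Iterate over the keys in dict2 that are not in dict1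
--     for key in dict2.keys() - dict1.keys():
--         result[key] = dict2[key]
--     # Return the resulting dictionary
--     return result
-- ===== SOURCE B (Python) =====
-- def subtract_dicts(dict1, dict2):
--     # Recursive decomposition: build flat (key, value) pair lists by structural
--     # recursion on the item lists, concatenate, and materialise one dict at the end
--     # (no in-place mutation of a result dict under construction).
--     def sub_vals(pairs, d2v):
--         if not pairs:
--             return []
--         (sk, x), *rest = pairs
--         return [(sk, x - d2v[sk])] + sub_vals(rest, d2v)
--
--     def sub_entries(entries):
--         if not entries:
--             return []
--         (k, v), *rest = entries
--         if k in dict2: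
--             head = (k, dict(sub_vals(list(v.items()), dict2[k])))
--         else:
--             head = (k, v)
--         return [head] + sub_entries(rest)
--
--     extras = [(k, v) for k, v in dict2.items() if k not in dict1]
--     return dict(sub_entries(list(dict1.items())) + extras)
-- ===== Notes on version B (the rewrite author's own statement) =====
-- stated objective: alternative
-- what changed: A mutates a result dict in place with one branching loop over dict1 plus a tail loop over the dict2-only key set; B instead builds flat (key, value) pair lists by structural recursion over the item lists (a recursive per-subkey subtraction and a recursive per-key pass), concatenates them with a filtered dict2 tail, and materialises a single dict from the pair list at the end.
import Mathlib
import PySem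

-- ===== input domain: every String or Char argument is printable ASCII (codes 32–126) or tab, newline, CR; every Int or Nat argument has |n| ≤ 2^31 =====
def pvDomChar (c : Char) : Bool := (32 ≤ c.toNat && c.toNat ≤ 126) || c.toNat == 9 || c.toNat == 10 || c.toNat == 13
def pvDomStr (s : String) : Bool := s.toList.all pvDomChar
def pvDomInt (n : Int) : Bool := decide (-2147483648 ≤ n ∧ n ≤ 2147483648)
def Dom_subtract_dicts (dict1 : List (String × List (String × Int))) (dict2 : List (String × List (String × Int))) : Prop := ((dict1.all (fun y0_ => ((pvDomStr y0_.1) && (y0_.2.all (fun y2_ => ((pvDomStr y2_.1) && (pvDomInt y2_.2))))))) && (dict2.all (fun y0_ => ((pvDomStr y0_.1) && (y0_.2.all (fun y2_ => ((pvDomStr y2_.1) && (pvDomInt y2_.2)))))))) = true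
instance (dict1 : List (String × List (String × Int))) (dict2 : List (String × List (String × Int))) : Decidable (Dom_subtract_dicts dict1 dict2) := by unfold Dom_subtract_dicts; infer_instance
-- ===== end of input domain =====

-- B replaces A's in-place mutation of a result dict (branching loop over dict1, tail loop over
-- the dict2-only keys) by structural recursion producing flat pair lists that are concatenated
-- and turned into one dict at the end (alternative decomposition, same cost). A's output order
-- for dict2-only keys follows Python's set iteration; dict outputs are compared ignoring order,
-- both ports use dict2's insertion order there.

-- shared interpretation of a nested-dict argument as an insertion-ordered PySem.Dict
-- (exact: duplicate keys in the encoding collapse as in a Python dict literal, last value wins)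
def pvNorm (d : List (String × List (String × Int))) : PySem.Dict String (PySem.Dict String Int) :=
  PySem.Dict.ofList (d.map (fun kv => (kv.1, PySem.Dict.ofList kv.2)))

-- ===== PORT A =====
def subtract_dicts (dict1 : List (String × List (String × Int))) (dict2 : List (String × List (String × Int))) : List (String × List (String × Int)) :=
  let d1 := pvNorm dict1
  let d2 := pvNorm dict2
  -- result = {}; for key in dict1.keys(): ...
  let result :=
    d1.items.foldl (fun result kv =>
      if d2.contains kv.1 then
        -- result[key] = {}; for subkey in dict1[key].keys():
        --   result[key][subkey] = dict1[key][subkey] - dict2[key][subkey]   (KeyError excluded by Pre_)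
        result.insert kv.1
          (kv.2.items.foldl
            (fun s sv => s.insert sv.1 (sv.2 - (d2.getD kv.1 PySem.Dict.empty).getD sv.1 0))
            PySem.Dict.empty)
      else
        result.insert kv.1 kv.2)
      PySem.Dict.empty
  -- for key in dict2.keys() - dict1.keys(): result[key] = dict2[key]
  let result :=
    d2.items.foldl (fun result kv =>
      if d1.contains kv.1 then result else result.insert kv.1 kv.2) result
  result.items.map (fun kv => (kv.1, kv.2.items))

-- ===== PORT B =====
-- def sub_vals(pairs, d2v): recursion over the subkey pairs (d2v[sk]: KeyError excluded by Pre_)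
def pvSubVals (pairs : List (String × Int)) (d2v : PySem.Dict String Int) : List (String × Int) :=
  match pairs with
  | [] => []
  | (sk, x) :: rest => (sk, x - d2v.getD sk 0) :: pvSubVals rest d2v

-- def sub_entries(entries): recursion over dict1's items
def pvSubEntries (d2 : PySem.Dict String (PySem.Dict String Int))
    (entries : List (String × PySem.Dict String Int)) : List (String × PySem.Dict String Int) :=
  match entries with
  | [] => []
  | (k, v) :: rest =>
    (if d2.contains k then (k, PySem.Dict.ofList (pvSubVals v.items (d2.getD k PySem.Dict.empty)))
     else (k, v)) :: pvSubEntries d2 rest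

def subtract_dicts_alt (dict1 : List (String × List (String × Int))) (dict2 : List (String × List (String × Int))) : List (String × List (String × Int)) :=
  let d1 := pvNorm dict1
  let d2 := pvNorm dict2
  -- extras = [(k, v) for k, v in dict2.items() if k not in dict1]
  let extras := d2.items.filter (fun kv => !d1.contains kv.1)
  -- return dict(sub_entries(list(dict1.items())) + extras)
  (PySem.Dict.ofList (pvSubEntries d2 d1.items ++ extras)).items.map (fun kv => (kv.1, kv.2.items))

-- ===== PRECONDITION & SPEC =====
-- Pre_ excludes exactly the inputs on which the Python raises KeyError: a key common to both
-- dicts whose dict1 sub-dict has a subkey missing from the corresponding dict2 sub-dict.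
def Pre_subtract_dicts (dict1 : List (String × List (String × Int))) (dict2 : List (String × List (String × Int))) : Prop :=
  ∀ kv ∈ (pvNorm dict1).items, (pvNorm dict2).contains kv.1 = true →
    ∀ sv ∈ kv.2.items, ((pvNorm dict2).getD kv.1 PySem.Dict.empty).contains sv.1 = true
instance (dict1 : List (String × List (String × Int))) (dict2 : List (String × List (String × Int))) : Decidable (Pre_subtract_dicts dict1 dict2) := by unfold Pre_subtract_dicts; infer_instance

def pvWitness_subtract_dicts : (List (String × List (String × Int))) × (List (String × List (String × Int))) :=
  ([("a", [("x", 3)]), ("b", [("z", 7)])], [("a", [("x", 1), ("y", 5)]), ("c", [("w", 2)])])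

def Spec_subtract_dicts (dict1 : List (String × List (String × Int))) (dict2 : List (String × List (String × Int))) (out : List (String × List (String × Int))) : Prop := out = subtract_dicts_alt dict1 dict2
instance (dict1 : List (String × List (String × Int))) (dict2 : List (String × List (String × Int))) (out : List (String × List (String × Int))) : Decidable (Spec_subtract_dicts dict1 dict2 out) := by unfold Spec_subtract_dicts; infer_instance

-- ===== CLAIM (what is proved, stated in full; the proofs are below) =====
def Claim_equal_subtract_dicts : Prop := ∀ (dict1 : List (String × List (String × Int))) (dict2 : List (String × List (String × Int))), Dom_subtract_dicts dict1 dict2 → Pre_subtract_dicts dict1 dict2 → Spec_subtract_dicts dict1 dict2 (subtract_dicts dict1 dict2)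

-- ===== LEMMAS AND PROOFS =====

theorem pv_mem_items_foldl {ν : Type} (l : List (String × ν)) (d : PySem.Dict String ν)
    (p : String × ν) (hp : p ∈ (l.foldl (fun r kv => r.insert kv.1 kv.2) d).items) :
    p ∈ d.items ∨ p ∈ l := by
  induction l generalizing d with
  | nil => exact Or.inl hp
  | cons h t ih =>
    rcases ih _ hp with hm | hm
    · rcases (PySem.Dict.mem_items_insert ..).mp hm with he | he
      · exact Or.inr (by simp [he])
      · exact Or.inl he.1
    · exact Or.inr (List.mem_cons_of_mem _ hm)

theorem pv_filter_map_fst {ν : Type} (l : List (String × ν)) (p : String → Bool) :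
    (l.filter (fun kv => p kv.1)).map Prod.fst = (l.map Prod.fst).filter p := by
  induction l with
  | nil => rfl
  | cons h t ih => by_cases hp : p h.1 <;> simp [hp, ih]

theorem pv_norm_val_nodup (d : List (String × List (String × Int)))
    (kv : String × PySem.Dict String Int) (h : kv ∈ (pvNorm d).items) : kv.2.keys.Nodup := by
  have h' : kv ∈ (PySem.Dict.empty : PySem.Dict String (PySem.Dict String Int)).items ∨
      kv ∈ d.map (fun kv => (kv.1, PySem.Dict.ofList kv.2)) :=
    pv_mem_items_foldl _ _ _ h
  rcases h' with h' | h'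
  · simp [PySem.Dict.empty] at h'
  · obtain ⟨x, _, hx⟩ := List.mem_map.mp h'
    rw [← hx]
    exact PySem.Dict.nodup_keys_ofList _

-- Dict.ofList of a pair list with distinct keys has exactly that items list
theorem pv_items_ofList {ν : Type} (l : List (String × ν)) (h : (l.map Prod.fst).Nodup) :
    (PySem.Dict.ofList l).items = l := by
  have : (PySem.Dict.ofList l) = l.foldl (fun d kv => d.insert kv.1 kv.2) PySem.Dict.empty := rfl
  rw [this]
  have := PySem.Dict.items_foldl_insert_fresh l Prod.fst Prod.snd PySem.Dict.empty
    (fun a _ => PySem.Dict.contains_empty ..) h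
  simpa using this

-- sub_vals is the pointwise subtraction map
theorem pv_subVals_eq_map (l : List (String × Int)) (d2v : PySem.Dict String Int) :
    pvSubVals l d2v = l.map (fun sv => (sv.1, sv.2 - d2v.getD sv.1 0)) := by
  induction l with
  | nil => rfl
  | cons h t ih => simp [pvSubVals, ih]

-- sub_entries is a map over dict1's items
theorem pv_subEntries_eq_map (d2 : PySem.Dict String (PySem.Dict String Int))
    (l : List (String × PySem.Dict String Int)) :
    pvSubEntries d2 l = l.map (fun kv =>
      if d2.contains kv.1 then
        (kv.1, PySem.Dict.ofList (pvSubVals kv.2.items (d2.getD kv.1 PySem.Dict.empty)))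
      else kv) := by
  induction l with
  | nil => rfl
  | cons h t ih => simp [pvSubEntries, ih]

theorem pv_subEntries_map_fst (d2 : PySem.Dict String (PySem.Dict String Int))
    (l : List (String × PySem.Dict String Int)) :
    (pvSubEntries d2 l).map Prod.fst = l.map Prod.fst := by
  rw [pv_subEntries_eq_map, List.map_map]
  apply List.map_congr_left
  intro kv _
  by_cases hc : d2.contains kv.1 <;> simp [hc]

-- the core equality of the two final dicts
theorem pv_core (d1 d2 : PySem.Dict String (PySem.Dict String Int))
    (h1 : d1.keys.Nodup) (h2 : d2.keys.Nodup)
    (hv : ∀ kv ∈ d1.items, kv.2.keys.Nodup) :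
    (d2.items.foldl (fun result kv =>
        if d1.contains kv.1 then result else result.insert kv.1 kv.2)
      (d1.items.foldl (fun result kv =>
        if d2.contains kv.1 then
          result.insert kv.1
            (kv.2.items.foldl
              (fun s sv => s.insert sv.1 (sv.2 - (d2.getD kv.1 PySem.Dict.empty).getD sv.1 0))
              PySem.Dict.empty)
        else
          result.insert kv.1 kv.2)
        PySem.Dict.empty))
    =
    PySem.Dict.ofList (pvSubEntries d2 d1.items ++ d2.items.filter (fun kv => !d1.contains kv.1)) := by
  have hkeys1 : d1.items.map Prod.fst = d1.keys := rfl
  have hkeys2 : d2.items.map Prod.fst = d2.keys := rfl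
  -- the per-key value A computes
  set FA : String × PySem.Dict String Int → PySem.Dict String Int := fun kv =>
    if d2.contains kv.1 then
      kv.2.items.foldl
        (fun s sv => s.insert sv.1 (sv.2 - (d2.getD kv.1 PySem.Dict.empty).getD sv.1 0))
        PySem.Dict.empty
    else kv.2 with hFA
  -- A's first loop always inserts, the branches only choose the value
  have eA1 : (fun (result : PySem.Dict String (PySem.Dict String Int)) (kv : String × PySem.Dict String Int) =>
      if d2.contains kv.1 then
        result.insert kv.1
          (kv.2.items.foldl
            (fun s sv => s.insert sv.1 (sv.2 - (d2.getD kv.1 PySem.Dict.empty).getD sv.1 0))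
            PySem.Dict.empty)
      else result.insert kv.1 kv.2)
      = (fun result kv => result.insert kv.1 (FA kv)) := by
    funext r kv; by_cases hc : d2.contains kv.1 <;> simp [hFA, hc]
  have eA2 : (fun (result : PySem.Dict String (PySem.Dict String Int)) (kv : String × PySem.Dict String Int) =>
      if d1.contains kv.1 then result else result.insert kv.1 kv.2)
      = (fun result kv => if !d1.contains kv.1 then result.insert kv.1 kv.2 else result) := by
    funext r kv; by_cases hc : d1.contains kv.1 <;> simp [hc]
  rw [eA1, eA2, PySem.List.foldl_if_eq_foldl_filter]
  -- items of A's first loop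
  have hF1 : (d1.items.foldl (fun r kv => r.insert kv.1 (FA kv)) PySem.Dict.empty).items
      = d1.items.map (fun kv => (kv.1, FA kv)) := by
    have := PySem.Dict.items_foldl_insert_fresh d1.items Prod.fst FA PySem.Dict.empty
      (fun a _ => PySem.Dict.contains_empty ..) (by rw [hkeys1]; exact h1)
    simpa using this
  have hF1keys : (d1.items.foldl (fun r kv => r.insert kv.1 (FA kv)) PySem.Dict.empty).keys
      = d1.keys := by
    show ((d1.items.foldl (fun r kv => r.insert kv.1 (FA kv)) PySem.Dict.empty).items.map Prod.fst) = _
    rw [hF1, List.map_map]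
    exact hkeys1 ▸ rfl
  -- the filtered tail has fresh, distinct keys
  have hLn : ((d2.items.filter (fun kv => !d1.contains kv.1)).map Prod.fst).Nodup := by
    rw [pv_filter_map_fst d2.items (fun y => !d1.contains y), hkeys2]; exact h2.filter _
  have hfresh : ∀ a ∈ d2.items.filter (fun kv => !d1.contains kv.1),
      (d1.items.foldl (fun r kv => r.insert kv.1 (FA kv)) PySem.Dict.empty).contains a.1 = false := by
    intro a ha
    have h1c := (List.mem_filter.mp ha).2
    simp only [Bool.not_eq_true'] at h1c
    rw [PySem.Dict.contains_eq_decide_mem_keys, hF1keys]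
    rw [PySem.Dict.contains_eq_decide_mem_keys] at h1c
    simpa using h1c
  -- items of A's final dict
  apply PySem.Dict.ext
  rw [PySem.Dict.items_foldl_insert_fresh _ Prod.fst Prod.snd _ hfresh hLn, hF1]
  -- items of B's final dict
  have hBn : ((pvSubEntries d2 d1.items ++ d2.items.filter (fun kv => !d1.contains kv.1)).map Prod.fst).Nodup := by
    rw [List.map_append, pv_subEntries_map_fst, hkeys1,
      pv_filter_map_fst d2.items (fun y => !d1.contains y), hkeys2]
    refine List.Nodup.append h1 (h2.filter _) ?_
    intro k hk1 hk2
    have := (List.mem_filter.mp hk2).2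
    rw [PySem.Dict.contains_eq_decide_mem_keys] at this
    simp [hk1] at this
  rw [pv_items_ofList _ hBn]
  -- the two pair lists agree componentwise
  have htail : (d2.items.filter (fun kv => !d1.contains kv.1)).map (fun a => (a.1, a.2))
      = d2.items.filter (fun kv => !d1.contains kv.1) := by simp
  rw [htail, pv_subEntries_eq_map]
  refine congrArg (· ++ _) ?_
  apply List.map_congr_left
  intro kv hkv
  by_cases hc : d2.contains kv.1
  · simp only [hFA, hc, if_true]
    refine congrArg (Prod.mk kv.1) ?_
    apply PySem.Dict.ext
    rw [pv_subVals_eq_map]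
    have hsub : ((kv.2.items.map (fun sv => (sv.1, sv.2 - (d2.getD kv.1 PySem.Dict.empty).getD sv.1 0))).map Prod.fst).Nodup := by
      rw [List.map_map]
      have hk : kv.2.items.map (Prod.fst ∘ fun sv : String × Int => (sv.1, sv.2 - (d2.getD kv.1 PySem.Dict.empty).getD sv.1 0)) = kv.2.items.map Prod.fst := by
        apply List.map_congr_left; intro sv _; rfl
      rw [hk]
      exact hv kv hkv
    rw [pv_items_ofList _ hsub]
    have := PySem.Dict.items_foldl_insert_fresh kv.2.items Prod.fst
      (fun sv => sv.2 - (d2.getD kv.1 PySem.Dict.empty).getD sv.1 0) PySem.Dict.empty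
      (fun a _ => PySem.Dict.contains_empty ..) (hv kv hkv)
    simpa using this
  · simp [hFA, hc]

-- ===== VERDICT (by name: the statement is the Claim_ definition above) =====
theorem subtract_dicts_spec : Claim_equal_subtract_dicts := by
  intro dict1 dict2 _ _
  unfold Spec_subtract_dicts
  simp only [subtract_dicts, subtract_dicts_alt]
  exact congrArg (fun d => d.items.map (fun kv => (kv.1, kv.2.items)))
    (pv_core (pvNorm dict1) (pvNorm dict2)
      (PySem.Dict.nodup_keys_ofList _) (PySem.Dict.nodup_keys_ofList _)
      (fun kv h => pv_norm_val_nodup dict1 kv h))
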